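-- pv_equiv track=rewrite | github.com/imensouidi/template | convert.py | process_skills_string
-- ===== SOURCE A (Python) =====
-- def process_skills_string(skills_str):
--     """
--     Traite une chaîne contenant des compétences réparties sur plusieurs lignes.
--     Fusionne les lignes de la même compétence si :
--       - La ligne précédente se termine par une virgule,
--       - OU si la ligne suivante débute par une lettre minuscule,
--       - OU si la ligne suivante contient une virgule.
--     Puis, retourne une chaîne où chaque compétence est séparée par une virgule.
--     """
--     lines = [line.strip() for line in skills_str.splitlines() if line.strip()]
--     skills_list = []
--     current_skill = ""
--     for line in lines:
--         if not current_skill: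
--             current_skill = line
--         else:
--             if current_skill.endswith(",") or line[0].islower() or ("," in line):
--                 current_skill += " " + line
--             else:
--                 skills_list.append(current_skill)
--                 current_skill = line
--     if current_skill:
--         skills_list.append(current_skill)
--     # Nettoyer les espaces superflus et supprimer les éventuels deux-points à la fin
--     skills_list = [skill.rstrip(":").strip() for skill in skills_list]
--     return ", ".join(skills_list)
-- ===== SOURCE B (Python) =====
-- def process_skills_string(skills_str):
--     """Two-phase re-implementation: recursively split the cleaned lines into
--     groups (a span-style take of continuation lines, judged from the previous
--     raw line), then format each group independently."""
--     lines = [line.strip() for line in skills_str.splitlines() if line.strip()]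
--     groups = _group(lines)
--     skills = [" ".join(g).rstrip(":").strip() for g in groups]
--     return ", ".join(skills)
--
--
-- def _continues(prev, line):
--     # line continues the skill that prev belongs to
--     return prev.endswith(",") or line[0].islower() or ("," in line)
--
--
-- def _take_group(prev, rest):
--     # longest prefix of rest that keeps continuing, plus the remainder
--     if rest and _continues(prev, rest[0]):
--         g, tail = _take_group(rest[0], rest[1:])
--         return [rest[0]] + g, tail
--     return [], rest
--
--
-- def _group(lines):
--     if not lines:
--         return []
--     g, rest = _take_group(lines[0], lines[1:])
--     return [[lines[0]] + g] + _group(rest)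
-- ===== Notes on version B (the rewrite author's own statement) =====
-- stated objective: alternative
-- what changed: Replaces A's single sentinel-accumulator loop (growing a current_skill string in place) with a two-phase decomposition: recursive span-style grouping of the cleaned lines, where the join-vs-break decision reads the previous raw line, followed by separate formatting (space-join, colon-rstrip, strip) of each group.
import Mathlib
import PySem

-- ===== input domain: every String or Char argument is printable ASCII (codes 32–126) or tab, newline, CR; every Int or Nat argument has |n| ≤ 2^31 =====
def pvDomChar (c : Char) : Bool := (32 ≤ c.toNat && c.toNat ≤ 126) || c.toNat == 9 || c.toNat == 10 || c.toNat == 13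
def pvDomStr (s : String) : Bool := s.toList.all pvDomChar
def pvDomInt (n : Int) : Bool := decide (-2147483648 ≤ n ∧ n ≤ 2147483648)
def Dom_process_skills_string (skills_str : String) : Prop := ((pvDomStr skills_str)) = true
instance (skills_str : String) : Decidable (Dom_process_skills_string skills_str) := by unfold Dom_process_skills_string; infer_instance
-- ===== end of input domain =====

-- B re-decomposes A's single sentinel-accumulator loop into two phases (recursive span-style
-- grouping of the cleaned lines, judged from the previous raw line, then formatting each group);
-- objective: alternative decomposition, same cost; return value only, no mutation involved.

-- ===== PORT A =====
-- shared helpers: both Pythons clean the lines and format a finished skill with the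
-- very same expressions, so the ports share these transliterations.
def pvCleanStep (line : String) (acc : List String) : List String :=
  let t := PySem.Str.strip line
  if t ≠ "" then t :: acc else acc

-- [line.strip() for line in s.splitlines() if line.strip()]
def pvCleanLines (s : String) : List String :=
  (PySem.Str.splitlines s).foldr pvCleanStep []

-- exact hand port of s.rstrip(":"): drop the trailing ':' characters
def pvRstripColon (s : String) : String :=
  String.ofList ((s.toList.reverse.dropWhile (fun c => c == ':')).reverse)

-- skill.rstrip(":").strip()
def pvFmt (sk : String) : String := PySem.Str.strip (pvRstripColon sk)

-- line[0].islower(); Python raises IndexError on "", unreachable here: cleaned lines are nonempty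
def pvIsLower0 (line : String) : Bool :=
  match PySem.Str.pyGet? line 0 with
  | some c => PySem.Chars.islower c
  | none => false

def pvAStep (st : List String × String) (line : String) : List String × String :=
  if st.2 = "" then (st.1, line)
  else if PySem.Str.endswith st.2 "," || pvIsLower0 line || PySem.Str.isIn "," line then
    (st.1, st.2 ++ " " ++ line)
  else (st.1 ++ [st.2], line)

def process_skills_string (skills_str : String) : String :=
  let lines := pvCleanLines skills_str
  let st := lines.foldl pvAStep ([], "")
  let skills_list := if st.2 ≠ "" then st.1 ++ [st.2] else st.1
  PySem.Str.join ", " (skills_list.map pvFmt)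

-- ===== PORT B =====
-- _continues(prev, line)
def pvCont (prev line : String) : Bool :=
  PySem.Str.endswith prev "," || pvIsLower0 line || PySem.Str.isIn "," line

-- _take_group(prev, rest)
def pvTakeGroup : String → List String → List String × List String
  | _, [] => ([], [])
  | prev, l :: ls =>
    if pvCont prev l then
      let r := pvTakeGroup l ls
      (l :: r.1, r.2)
    else ([], l :: ls)

theorem pvTakeGroup_snd_length : ∀ (prev : String) (ls : List String),
    (pvTakeGroup prev ls).2.length ≤ ls.length := by
  intro prev ls
  induction ls generalizing prev with
  | nil => simp [pvTakeGroup]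
  | cons l ls ih =>
    simp only [pvTakeGroup]
    split
    · exact Nat.le_succ_of_le (ih l)
    · simp

-- _group(lines)
def pvGroup : List String → List (List String)
  | [] => []
  | l :: ls =>
    let r := pvTakeGroup l ls
    (l :: r.1) :: pvGroup r.2
termination_by ls => ls.length
decreasing_by exact Nat.lt_succ_of_le (pvTakeGroup_snd_length l ls)

def process_skills_string_alt (skills_str : String) : String :=
  let lines := pvCleanLines skills_str
  let groups := pvGroup lines
  let skills := groups.map (fun g => pvFmt (PySem.Str.join " " g))
  PySem.Str.join ", " skills

-- ===== PRECONDITION & SPEC =====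
def Spec_process_skills_string (skills_str : String) (out : String) : Prop := out = process_skills_string_alt skills_str
instance (skills_str : String) (out : String) : Decidable (Spec_process_skills_string skills_str out) := by unfold Spec_process_skills_string; infer_instance

-- ===== CLAIM (what is proved, stated in full; the proofs are below) =====
def Claim_equal_process_skills_string : Prop := ∀ (skills_str : String), Dom_process_skills_string skills_str → Spec_process_skills_string skills_str (process_skills_string skills_str)

-- ===== LEMMAS AND PROOFS =====

theorem pvCleanLines_ne_nil (s : String) : ∀ l ∈ pvCleanLines s, l ≠ "" := by
  unfold pvCleanLines
  induction PySem.Str.splitlines s with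
  | nil => simp
  | cons x xs ih =>
    intro l hl
    simp only [List.foldr_cons, pvCleanStep] at hl
    by_cases hx : PySem.Str.strip x ≠ ""
    · rw [if_pos hx] at hl
      rcases List.mem_cons.mp hl with h | h
      · rw [h]; exact hx
      · exact ih l h
    · rw [if_neg hx] at hl
      exact ih l hl

theorem suffix_singleton_iff (c : Char) (l : List Char) :
    ([c] <:+ l) ↔ l.getLast? = some c := by
  constructor
  · rintro ⟨t, rfl⟩; simp
  · intro h
    cases l.eq_nil_or_concat with
    | inl h' => simp [h'] at h
    | inr h' =>
      obtain ⟨l', a, rfl⟩ := h'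
      simp at h
      subst h; exact ⟨l', by simp⟩

theorem endswith_comma_append (x l : String) (hl : l ≠ "") :
    PySem.Str.endswith (x ++ " " ++ l) "," = PySem.Str.endswith l "," := by
  have hl' : l.toList ≠ [] := by
    intro h; apply hl; exact String.toList_inj.mp (by simp [h])
  rw [PySem.Str.endswith_eq, PySem.Str.endswith_eq, Bool.eq_iff_iff,
      PySem.Chars.endswith_iff, PySem.Chars.endswith_iff]
  have : ("," : String).toList = [','] := rfl
  rw [this, suffix_singleton_iff, suffix_singleton_iff]
  simp only [String.toList_append]
  rw [List.append_assoc, List.getLast?_append_of_ne_nil _ (by simp)]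
  rw [List.getLast?_append_of_ne_nil _ hl']

theorem join_singleton_str (a : String) : PySem.Str.join " " [a] = a := by
  apply String.toList_inj.mp
  simp only [PySem.Str.join, List.map_cons, List.map_nil]
  rw [PySem.Chars.join_singleton]
  simp

theorem join_glue_chars (sep a b : List Char) (g : List (List Char)) :
    PySem.Chars.join sep ((a ++ sep ++ b) :: g) = PySem.Chars.join sep (a :: b :: g) := by
  cases g with
  | nil =>
    rw [PySem.Chars.join_singleton, PySem.Chars.join_cons_cons, PySem.Chars.join_singleton]
  | cons q qs =>
    rw [PySem.Chars.join_cons_cons, PySem.Chars.join_cons_cons, PySem.Chars.join_cons_cons]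
    simp

theorem join_glue (a b : String) (g : List String) :
    PySem.Str.join " " ((a ++ " " ++ b) :: g) = PySem.Str.join " " (a :: b :: g) := by
  simp only [PySem.Str.join, List.map_cons, String.toList_append]
  rw [join_glue_chars]

theorem loop_eq : ∀ (ls : List String) (acc : List String) (cur prev : String),
    cur ≠ "" → prev ≠ "" →
    PySem.Str.endswith cur "," = PySem.Str.endswith prev "," →
    (∀ l ∈ ls, l ≠ "") →
    (let st := ls.foldl pvAStep (acc, cur)
     if st.2 ≠ "" then st.1 ++ [st.2] else st.1)
    = acc ++ PySem.Str.join " " (cur :: (pvTakeGroup prev ls).1)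
          :: (pvGroup (pvTakeGroup prev ls).2).map (fun g => PySem.Str.join " " g) := by
  intro ls
  induction ls with
  | nil =>
    intro acc cur prev hcur _ _ _
    simp [pvTakeGroup, pvGroup, join_singleton_str, hcur]
  | cons l ls ih =>
    intro acc cur prev hcur hprev hend hmem
    have hl : l ≠ "" := hmem l (by simp)
    have hmem' : ∀ x ∈ ls, x ≠ "" := fun x hx => hmem x (by simp [hx])
    simp only [List.foldl_cons, pvTakeGroup]
    have hstep : pvAStep (acc, cur) l =
        if pvCont prev l then (acc, cur ++ " " ++ l) else (acc ++ [cur], l) := by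
      simp only [pvAStep, pvCont, if_neg hcur, hend]
      rfl
    rw [hstep]
    by_cases hc : pvCont prev l
    · rw [if_pos hc, if_pos hc]
      have h1 : cur ++ " " ++ l ≠ "" := by
        intro h
        have := congrArg String.toList h
        simp at this
      have h2 : PySem.Str.endswith (cur ++ " " ++ l) "," = PySem.Str.endswith l "," :=
        endswith_comma_append cur l hl
      have := ih acc (cur ++ " " ++ l) l h1 hl h2 hmem'
      simp only at this
      rw [this, join_glue]
    · rw [if_neg hc, if_neg hc]
      have := ih (acc ++ [cur]) l l hl hl rfl hmem'
      simp only at this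
      rw [this]
      rw [pvGroup, join_singleton_str]
      simp

-- ===== VERDICT (by name: the statement is the Claim_ definition above) =====
theorem process_skills_string_spec : Claim_equal_process_skills_string := by
  unfold Claim_equal_process_skills_string Spec_process_skills_string
  intro s _
  unfold process_skills_string process_skills_string_alt
  cases h : pvCleanLines s with
  | nil => simp [pvGroup]
  | cons l ls =>
    have hl : l ≠ "" := pvCleanLines_ne_nil s l (by simp [h])
    have hmem : ∀ x ∈ ls, x ≠ "" := fun x hx => pvCleanLines_ne_nil s x (by simp [h, hx])
    simp only [List.foldl_cons]
    have hfirst : pvAStep ([], "") l = ([], l) := by simp [pvAStep]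
    rw [hfirst]
    have := loop_eq ls [] l l hl hl rfl hmem
    simp only at this
    rw [this]
    rw [pvGroup]
    simp [List.map_map, Function.comp_def]
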